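-- pv_equiv track=rewrite | github.com/worksubmission/HiCert | utils/pd.py | data_analysis_the_number_of_mutant
-- ===== SOURCE A (Python) =====
-- def data_analysis_the_number_of_mutant(prediction_map,confidence_map, orig_pred, label):
--     pred_one_mask = prediction_map
--     counter_inconsistent_mutant=0
--     counter_diversity_inconsistent_mutant=0
--     label_inconsistent=[]
--     "first, checking OMA y_0, OMA OMA orig_pred or not"
--
--     for i in range(len(pred_one_mask)):
--         this_mask_pred=pred_one_mask[i]
--         if not this_mask_pred==label:
--             if this_mask_pred in label_inconsistent:
--                 continue
--             else:
--                 label_inconsistent.append(this_mask_pred)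
--                 counter_diversity_inconsistent_mutant=counter_diversity_inconsistent_mutant+1
--             counter_inconsistent_mutant=counter_inconsistent_mutant+1
--     return counter_inconsistent_mutant, counter_diversity_inconsistent_mutant
-- ===== SOURCE B (Python) =====
-- def data_analysis_the_number_of_mutant(prediction_map, confidence_map, orig_pred, label):
--     # Peel-off algorithm: repeatedly take the first remaining value, count it
--     # once if it differs from label, and delete all its occurrences from the rest.
--     d = 0
--     xs = list(prediction_map)
--     while xs:
--         h = xs[0]
--         if h != label:
--             d += 1
--         xs = [x for x in xs[1:] if x != h]
--     return d, d
-- ===== Notes on version B (the rewrite author's own statement) =====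
-- stated objective: alternative
-- what changed: Both of A's counters always equal the number of distinct predictions differing from the label; B computes that number by a peel-off algorithm (repeatedly count the first remaining value once, skip it if it equals label, and filter all its occurrences out of the rest), with no seen-set, no membership test and a single counter.
import Mathlib
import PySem

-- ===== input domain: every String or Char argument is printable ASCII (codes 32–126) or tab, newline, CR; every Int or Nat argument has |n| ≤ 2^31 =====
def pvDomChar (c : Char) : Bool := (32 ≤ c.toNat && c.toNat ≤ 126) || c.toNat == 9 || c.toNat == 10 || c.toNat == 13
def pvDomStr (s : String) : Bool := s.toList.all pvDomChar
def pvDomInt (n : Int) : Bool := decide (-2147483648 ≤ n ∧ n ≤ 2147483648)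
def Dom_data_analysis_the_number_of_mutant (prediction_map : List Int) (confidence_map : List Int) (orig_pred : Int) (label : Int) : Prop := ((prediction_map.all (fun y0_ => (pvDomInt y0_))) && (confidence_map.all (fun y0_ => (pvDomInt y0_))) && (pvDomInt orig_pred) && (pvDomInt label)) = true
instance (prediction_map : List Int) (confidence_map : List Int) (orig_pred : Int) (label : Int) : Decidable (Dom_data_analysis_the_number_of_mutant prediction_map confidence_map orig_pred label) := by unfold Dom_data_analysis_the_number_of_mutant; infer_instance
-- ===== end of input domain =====

-- B replaces A's seen-set loop with two parallel counters by a peel-off algorithm: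
-- repeatedly count the first remaining value (unless it equals label) and filter
-- all its occurrences out of the rest; same value, stated as an alternative (not faster).

-- ===== PORT A =====
-- one loop iteration of A: state = (counter_inconsistent, counter_diversity_inconsistent, label_inconsistent)
def pvStepA (label : Int) (st : Int × Int × List Int) (this_mask_pred : Int) : Int × Int × List Int :=
  if this_mask_pred = label then st
  else
    let (ci, cd, seen) := st
    if seen.contains this_mask_pred then st   -- 'continue'
    else (ci + 1, cd + 1, seen ++ [this_mask_pred])

def data_analysis_the_number_of_mutant (prediction_map : List Int) (confidence_map : List Int) (orig_pred : Int) (label : Int) : Int × Int :=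
  let r := prediction_map.foldl (pvStepA label) (0, 0, [])
  (r.1, r.2.1)

-- ===== PORT B =====
-- Source B's while-loop: peel off the head value, count it once unless it equals label,
-- filter its occurrences out of the remaining list
def pvPeel (label : Int) (xs : List Int) : Int :=
  match xs with
  | [] => 0
  | h :: t =>
      (if h = label then 0 else 1) + pvPeel label (t.filter (fun x => x ≠ h))
termination_by xs.length
decreasing_by
  simp only [List.length_unattach, List.length_cons]
  exact Nat.lt_succ_of_le (le_trans (List.length_filter_le _ _) (by simp))

def data_analysis_the_number_of_mutant_alt (prediction_map : List Int) (confidence_map : List Int) (orig_pred : Int) (label : Int) : Int × Int :=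
  let d := pvPeel label prediction_map
  (d, d)

-- ===== PRECONDITION & SPEC =====
def Spec_data_analysis_the_number_of_mutant (prediction_map : List Int) (confidence_map : List Int) (orig_pred : Int) (label : Int) (out : Int × Int) : Prop := out = data_analysis_the_number_of_mutant_alt prediction_map confidence_map orig_pred label
instance (prediction_map : List Int) (confidence_map : List Int) (orig_pred : Int) (label : Int) (out : Int × Int) : Decidable (Spec_data_analysis_the_number_of_mutant prediction_map confidence_map orig_pred label out) := by unfold Spec_data_analysis_the_number_of_mutant; infer_instance

-- ===== CLAIM (what is proved, stated in full; the proofs are below) =====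
def Claim_equal_data_analysis_the_number_of_mutant : Prop := ∀ (prediction_map : List Int) (confidence_map : List Int) (orig_pred : Int) (label : Int), Dom_data_analysis_the_number_of_mutant prediction_map confidence_map orig_pred label → Spec_data_analysis_the_number_of_mutant prediction_map confidence_map orig_pred label (data_analysis_the_number_of_mutant prediction_map confidence_map orig_pred label)

-- ===== LEMMAS AND PROOFS =====

-- the common yardstick: the finset of values of xs that differ from label
def pvTarget (label : Int) (xs : List Int) : Finset Int :=
  (xs.filter (fun x => x ≠ label)).toFinset

-- B side: pvPeel computes the cardinality of pvTarget
lemma pvPeel_eq_card (label : Int) (xs : List Int) :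
    pvPeel label xs = ((pvTarget label xs).card : Int) := by
  induction xs using pvPeel.induct with
  | case1 => simp [pvPeel, pvTarget]
  | case2 h t ih =>
    rw [List.unattach_filter (g := fun x => decide (x ≠ h)) (hf := fun x hx => rfl),
        List.unattach_attach] at ih
    rw [pvPeel, ih]
    have hrec : pvTarget label (t.filter (fun x => x ≠ h)) = (pvTarget label t).erase h := by
      unfold pvTarget
      ext y
      simp only [List.mem_toFinset, List.mem_filter, Finset.mem_erase, decide_eq_true_eq]
      tauto
    rw [hrec]
    by_cases hl : h = label
    · subst hl
      have hnm : h ∉ pvTarget h t := by simp [pvTarget]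
      have htdrop : pvTarget h (h :: t) = pvTarget h t := by
        simp [pvTarget, List.filter_cons]
      rw [Finset.erase_eq_of_notMem hnm, htdrop]
      simp
    · have hins : pvTarget label (h :: t) = insert h (pvTarget label t) := by
        simp [pvTarget, List.filter_cons, hl]
      have hcard : (insert h (pvTarget label t)).card = ((pvTarget label t).erase h).card + 1 := by
        by_cases hm : h ∈ pvTarget label t
        · rw [Finset.card_erase_of_mem hm, Finset.card_insert_of_mem hm]
          have := Finset.card_pos.mpr ⟨h, hm⟩
          omega
        · rw [Finset.erase_eq_of_notMem hm, Finset.card_insert_of_notMem hm]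
      rw [hins, hcard, if_neg hl]
      push_cast
      ring

-- A side: the seen-set A's loop builds, as a pure fold
def pvSeenA (label : Int) (xs : List Int) (seen : List Int) : List Int :=
  xs.foldl (fun acc x => if x = label then acc else PySem.Set.add acc x) seen

lemma pvSeenA_nodup (label : Int) (xs : List Int) (seen : List Int) (h : seen.Nodup) :
    (pvSeenA label xs seen).Nodup := by
  induction xs generalizing seen with
  | nil => exact h
  | cons x xs ih =>
    simp only [pvSeenA, List.foldl_cons]
    split_ifs with hx
    · exact ih seen h
    · exact ih _ (PySem.Set.nodup_add _ _ h)

lemma pvSeenA_mem (label : Int) (xs : List Int) (seen : List Int) (y : Int) :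
    y ∈ pvSeenA label xs seen ↔ y ∈ seen ∨ (y ∈ xs ∧ y ≠ label) := by
  induction xs generalizing seen with
  | nil => simp [pvSeenA]
  | cons x xs ih =>
    simp only [pvSeenA, List.foldl_cons]
    split_ifs with hx
    · simp only [pvSeenA] at ih
      rw [ih]
      subst hx
      constructor
      · rintro (h | ⟨h1, h2⟩)
        · exact Or.inl h
        · exact Or.inr ⟨List.mem_cons_of_mem _ h1, h2⟩
      · rintro (h | ⟨h1, h2⟩)
        · exact Or.inl h
        · rcases List.mem_cons.mp h1 with rfl | h1
          · exact absurd rfl h2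
          · exact Or.inr ⟨h1, h2⟩
    · simp only [pvSeenA] at ih
      rw [ih, PySem.Set.mem_add]
      constructor
      · rintro (⟨h | rfl⟩ | ⟨h1, h2⟩)
        · exact Or.inl h
        · exact Or.inr ⟨List.mem_cons_self .., hx⟩
        · exact Or.inr ⟨List.mem_cons_of_mem _ h1, h2⟩
      · rintro (h | ⟨h1, h2⟩)
        · exact Or.inl (Or.inl h)
        · rcases List.mem_cons.mp h1 with rfl | h1
          · exact Or.inl (Or.inr rfl)
          · exact Or.inr ⟨h1, h2⟩

lemma pvLoopA_eq (label : Int) (xs : List Int) (ci cd : Int) (seen : List Int) :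
    xs.foldl (pvStepA label) (ci, cd, seen) =
      (ci + ((pvSeenA label xs seen).length - seen.length : Int),
       cd + ((pvSeenA label xs seen).length - seen.length : Int),
       pvSeenA label xs seen) := by
  induction xs generalizing ci cd seen with
  | nil => simp [pvSeenA]
  | cons x xs ih =>
    simp only [List.foldl_cons, pvStepA, pvSeenA]
    split_ifs with hx hmem
    · rw [ih]; rfl
    · rw [ih]
      have : PySem.Set.add seen x = seen :=
        PySem.Set.add_of_mem (by simpa using hmem)
      simp only [pvSeenA] at *
      simp [this]
    · rw [ih]
      have : PySem.Set.add seen x = seen ++ [x] :=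
        PySem.Set.add_of_not_mem (by simpa using hmem)
      simp only [pvSeenA] at *
      simp only [this, List.length_append, List.length_cons, List.length_nil, Prod.mk.injEq]
      exact ⟨by push_cast; ring, by push_cast; ring, trivial⟩

lemma pvSeenA_length_eq_card (label : Int) (xs : List Int) :
    ((pvSeenA label xs []).length : Int) = ((pvTarget label xs).card : Int) := by
  have hnd : (pvSeenA label xs []).Nodup := pvSeenA_nodup label xs [] List.nodup_nil
  have hfin : (pvSeenA label xs []).toFinset = pvTarget label xs := by
    ext y
    simp only [List.mem_toFinset, pvSeenA_mem, pvTarget, List.mem_filter,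
      List.not_mem_nil, false_or, decide_eq_true_eq]
  have := List.toFinset_card_of_nodup hnd
  rw [hfin] at this
  exact_mod_cast this.symm

-- ===== VERDICT (by name: the statement is the Claim_ definition above) =====
theorem data_analysis_the_number_of_mutant_spec : Claim_equal_data_analysis_the_number_of_mutant := by
  intro pm cm op lb _
  unfold Spec_data_analysis_the_number_of_mutant
  unfold data_analysis_the_number_of_mutant data_analysis_the_number_of_mutant_alt
  rw [pvLoopA_eq, pvPeel_eq_card]
  have := pvSeenA_length_eq_card lb pm
  simp [this]
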